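-- pv_equiv track=rewrite | github.com/PabloBorda/brainboost-com_brainboost-limited_www_consulting_ocr | com_brainboost_limited_consulting_batch_receipt_converter_service.py | normalize_file_names_before_processing
-- ===== SOURCE A (Python) =====
-- def normalize_file_names_before_processing(file_name):
--     parts = file_name.split('.')
--     extension = parts[-1]
--     name = '.'.join(parts[:-1])
--     bad_characters = [' ','.','(',')','[',']','*','+',',']
--
--     for bad_char in bad_characters:
--         name = name.replace(bad_char,'_')
--
--     return (name + '.' + extension)
-- ===== SOURCE B (Python) =====
-- def normalize_file_names_before_processing(file_name):
--     name, _, extension = file_name.rpartition('.')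
--     bad = set(' .()[]*+,')
--     return ''.join('_' if c in bad else c for c in name) + '.' + extension
-- ===== Notes on version B (the rewrite author's own statement) =====
-- stated objective: simpler
-- what changed: Replaces split/join plus nine sequential str.replace passes over the name with a single rpartition on the last dot and one character-level pass that maps each bad character to an underscore.
import Mathlib
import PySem

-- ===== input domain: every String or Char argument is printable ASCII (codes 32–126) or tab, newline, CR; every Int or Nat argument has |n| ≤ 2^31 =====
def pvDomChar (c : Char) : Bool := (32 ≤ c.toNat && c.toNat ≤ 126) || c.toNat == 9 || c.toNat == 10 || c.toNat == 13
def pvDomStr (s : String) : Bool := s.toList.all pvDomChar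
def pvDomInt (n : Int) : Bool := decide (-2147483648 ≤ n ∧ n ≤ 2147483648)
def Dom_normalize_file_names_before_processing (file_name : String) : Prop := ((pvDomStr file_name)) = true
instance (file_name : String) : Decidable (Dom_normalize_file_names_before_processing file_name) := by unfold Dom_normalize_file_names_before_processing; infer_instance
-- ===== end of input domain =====

-- B replaces A's split/join plus nine sequential replace passes by one rpartition at the last '.' and a single
-- character-level pass mapping each bad character to '_' (objective: simpler).

-- ===== PORT A =====
-- split('.') via Str.split? (sep ≠ "", so always `some`); parts[-1] via pyGet? (split never returns [], so never `none`);
-- parts[:-1] via slice; the for-loop of nine replace passes as a foldl over the literal bad_characters list.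
def normalize_file_names_before_processing (file_name : String) : String :=
  let parts : List String := (PySem.Str.split? file_name ".").getD []
  let extension : String := (PySem.List.pyGet? parts (-1)).getD ""
  let name : String := PySem.Str.join "." (PySem.List.slice parts none (some (-1)))
  let bad_characters : List String := [" ", ".", "(", ")", "[", "]", "*", "+", ","]
  let name2 : String := bad_characters.foldl (fun n bad_char => PySem.Str.replace n bad_char "_") name
  name2 ++ "." ++ extension

-- ===== PORT B =====
def pvBad : PySem.Set Char := PySem.Set.ofList [' ', '.', '(', ')', '[', ']', '*', '+', ',']

-- rpartition('.') is ported by hand via rfind + take/drop (exact: splits at the LAST '.'; ("", "", s) when no '.');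
-- the ''.join(generator) single pass is the map over name's characters.
def normalize_file_names_before_processing_alt (file_name : String) : String :=
  let s := file_name.toList
  let k := PySem.Chars.rfind s ['.']
  let name : List Char := if k = -1 then [] else s.take k.toNat
  let extension : List Char := if k = -1 then s else s.drop (k.toNat + 1)
  String.ofList ((name.map fun c => if c ∈ pvBad then '_' else c) ++ ['.'] ++ extension)

-- ===== PRECONDITION & SPEC =====
def Spec_normalize_file_names_before_processing (file_name : String) (out : String) : Prop := out = normalize_file_names_before_processing_alt file_name
instance (file_name : String) (out : String) : Decidable (Spec_normalize_file_names_before_processing file_name out) := by unfold Spec_normalize_file_names_before_processing; infer_instance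

-- ===== CLAIM (what is proved, stated in full; the proofs are below) =====
def Claim_equal_normalize_file_names_before_processing : Prop := ∀ (file_name : String), Dom_normalize_file_names_before_processing file_name → Spec_normalize_file_names_before_processing file_name (normalize_file_names_before_processing file_name)

-- ===== LEMMAS AND PROOFS =====

-- the bad characters, as a plain list
def pvBadL : List Char := [' ', '.', '(', ')', '[', ']', '*', '+', ',']

-- structural single-character split (reference model of Chars.splitOn with a one-char separator)
def pvSplit (o : Char) : List Char → List (List Char)
  | [] => [[]]
  | a :: t =>
    if a = o then [] :: pvSplit o t
    else
      match pvSplit o t with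
      | [] => [[a]]
      | h :: r => (a :: h) :: r

theorem pvSplit_ne_nil (o : Char) (s : List Char) : pvSplit o s ≠ [] := by
  cases s with
  | nil => simp [pvSplit]
  | cons a t =>
    simp only [pvSplit]
    split
    · simp
    · cases h : pvSplit o t <;> simp

theorem prefix_single_mem {o : Char} {l : List Char} (h : [o].isPrefixOf l = true) : o ∈ l := by
  cases l with
  | nil => simp [List.isPrefixOf] at h
  | cons a t =>
    simp only [List.isPrefixOf, Bool.and_true, beq_iff_eq] at h
    simp [h]

theorem prefix_single_head (o : Char) (t : List Char) : [o].isPrefixOf (o :: t) = true := by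
  simp [List.isPrefixOf]

theorem prefix_single_ne {o a : Char} (t : List Char) (h : a ≠ o) :
    [o].isPrefixOf (a :: t) = false := by
  simp [List.isPrefixOf]
  exact fun he => absurd he.symm h

-- ---------- rfind ----------

theorem rfind_go_not_mem (s : List Char) (o : Char) (h : o ∉ s) :
    ∀ j, PySem.Chars.rfind.go s [o] j = -1 := by
  intro j
  induction j with
  | zero =>
    simp only [PySem.Chars.rfind.go]
    rw [if_neg]
    intro hp
    exact h (prefix_single_mem hp)
  | succ j ih =>
    simp only [PySem.Chars.rfind.go]
    rw [if_neg, ih]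
    intro hp
    exact h (List.drop_subset _ _ (prefix_single_mem hp))

theorem rfind_not_mem (s : List Char) (o : Char) (h : o ∉ s) :
    PySem.Chars.rfind s [o] = -1 := by
  unfold PySem.Chars.rfind
  exact rfind_go_not_mem s o h _

theorem rfind_go_decomp (u v : List Char) (o : Char) (hv : o ∉ v) :
    ∀ d, PySem.Chars.rfind.go (u ++ o :: v) [o] (u.length + d) = u.length := by
  intro d
  induction d with
  | zero =>
    cases hn : u.length with
    | zero =>
      have hu : u = [] := List.length_eq_zero_iff.mp hn
      subst hu
      simp only [List.nil_append, PySem.Chars.rfind.go]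
      rw [if_pos (prefix_single_head o v)]
      simp
    | succ j =>
      have hdrop : List.drop (j + 1) (u ++ o :: v) = o :: v := by
        rw [← hn]; exact List.drop_left
      simp only [PySem.Chars.rfind.go]
      rw [hdrop, if_pos (prefix_single_head o v)]
  | succ d ih =>
    have hdrop : List.drop (u.length + d + 1) (u ++ o :: v) = List.drop d v := by
      have h1 : u.length + d + 1 = u.length + (d + 1) := by omega
      rw [h1, ← List.drop_drop, List.drop_left, List.drop_succ_cons]
    have : u.length + (d + 1) = (u.length + d) + 1 := by omega
    rw [this]
    simp only [PySem.Chars.rfind.go]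
    rw [hdrop, if_neg, ih]
    intro hp
    exact hv (List.drop_subset _ _ (prefix_single_mem hp))

theorem rfind_decomp (u v : List Char) (o : Char) (hv : o ∉ v) :
    PySem.Chars.rfind (u ++ o :: v) [o] = u.length := by
  unfold PySem.Chars.rfind
  have hl : (u ++ o :: v).length = u.length + (v.length + 1) := by
    simp [List.length_append]
  rw [hl]
  exact rfind_go_decomp u v o hv (v.length + 1)

-- ---------- splitOn ----------

theorem splitOn_go_spec (o : Char) :
    ∀ fuel (l cur : List Char) (acc : List (List Char)), l.length ≤ fuel →
      PySem.Chars.splitOn.go [o] fuel l cur acc =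
        acc.reverse ++ (cur.reverse ++ (pvSplit o l).headI) :: (pvSplit o l).tail := by
  intro fuel
  induction fuel with
  | zero =>
    intro l cur acc h
    have hl : l = [] := List.length_eq_zero_iff.mp (Nat.le_zero.mp h)
    subst hl
    simp [PySem.Chars.splitOn.go, pvSplit]
  | succ fuel ih =>
    intro l cur acc h
    cases l with
    | nil => simp [PySem.Chars.splitOn.go, pvSplit]
    | cons c rest =>
      have hrest : rest.length ≤ fuel := by simpa using h
      by_cases hc : c = o
      · subst hc
        simp only [PySem.Chars.splitOn.go]
        rw [if_pos (prefix_single_head c rest)]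
        simp only [List.length_cons, List.length_nil, List.drop_succ_cons, List.drop_zero]
        rw [ih rest [] (cur.reverse :: acc) hrest]
        have hne := pvSplit_ne_nil c rest
        obtain ⟨h0, t0, hps⟩ : ∃ h0 t0, pvSplit c rest = h0 :: t0 := by
          cases hps : pvSplit c rest with
          | nil => exact absurd hps hne
          | cons a b => exact ⟨a, b, rfl⟩
        simp [pvSplit, hps]
      · simp only [PySem.Chars.splitOn.go]
        rw [prefix_single_ne rest hc]
        simp only [Bool.false_eq_true, if_false]
        rw [ih rest (c :: cur) acc hrest]
        have hne := pvSplit_ne_nil o rest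
        obtain ⟨h0, t0, hps⟩ : ∃ h0 t0, pvSplit o rest = h0 :: t0 := by
          cases hps : pvSplit o rest with
          | nil => exact absurd hps hne
          | cons a b => exact ⟨a, b, rfl⟩
        simp [pvSplit, hc, hps]

theorem splitOn_eq_pvSplit (o : Char) (s : List Char) :
    PySem.Chars.splitOn s [o] = pvSplit o s := by
  unfold PySem.Chars.splitOn
  rw [splitOn_go_spec o (s.length + 1) s [] [] (by omega)]
  have hne := pvSplit_ne_nil o s
  obtain ⟨h0, t0, hps⟩ : ∃ h0 t0, pvSplit o s = h0 :: t0 := by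
    cases hps : pvSplit o s with
    | nil => exact absurd hps hne
    | cons a b => exact ⟨a, b, rfl⟩
  simp [hps]

theorem pvSplit_not_mem {o : Char} {s : List Char} (h : o ∉ s) : pvSplit o s = [s] := by
  induction s with
  | nil => simp [pvSplit]
  | cons a t ih =>
    simp only [List.mem_cons, not_or] at h
    have ha : ¬ a = o := fun he => h.1 he.symm
    simp [pvSplit, ha, ih h.2]

theorem pvSplit_decomp (o : Char) (u v : List Char) (hv : o ∉ v) :
    2 ≤ (pvSplit o (u ++ o :: v)).length ∧
      (pvSplit o (u ++ o :: v)).getLast? = some v ∧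
      PySem.Chars.join [o] ((pvSplit o (u ++ o :: v)).dropLast) = u := by
  induction u with
  | nil =>
    simp only [List.nil_append, pvSplit, pvSplit_not_mem hv]
    refine ⟨by simp, by simp, ?_⟩
    simp [PySem.Chars.join_singleton]
  | cons a u ih =>
    obtain ⟨hlen, hlast, hjoin⟩ := ih
    obtain ⟨p, q, rest, hP⟩ : ∃ p q rest, pvSplit o (u ++ o :: v) = p :: q :: rest := by
      cases hps : pvSplit o (u ++ o :: v) with
      | nil => rw [hps] at hlen; simp at hlen
      | cons p t =>
        cases t with
        | nil => rw [hps] at hlen; simp at hlen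
        | cons q rest => exact ⟨p, q, rest, rfl⟩
    rw [hP] at hlast hjoin
    have hjoin' : PySem.Chars.join [o] (p :: (q :: rest).dropLast) = u := by
      simpa [List.dropLast_cons₂] using hjoin
    by_cases ha : a = o
    · subst ha
      have hstep : pvSplit a ((a :: u) ++ a :: v) = [] :: pvSplit a (u ++ a :: v) := by
        simp [pvSplit]
      rw [hstep, hP]
      refine ⟨by simp, by simp_all, ?_⟩
      have hd : (([] : List Char) :: p :: q :: rest).dropLast =
          ([] : List Char) :: p :: (q :: rest).dropLast := by
        simp [List.dropLast_cons₂]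
      rw [hd, PySem.Chars.join_cons_cons, hjoin']
      simp
    · have hstep : pvSplit o ((a :: u) ++ o :: v) = (a :: p) :: q :: rest := by
        simp only [List.cons_append, pvSplit, hP]
        rw [if_neg ha]
      rw [hstep]
      refine ⟨by simp, by simp_all, ?_⟩
      have hd : ((a :: p) :: q :: rest).dropLast = (a :: p) :: (q :: rest).dropLast := by
        simp [List.dropLast_cons₂]
      rw [hd]
      cases hrest : (q :: rest).dropLast with
      | nil =>
        rw [hrest] at hjoin'
        rw [PySem.Chars.join_singleton] at hjoin' ⊢
        simp [hjoin']
      | cons w ws =>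
        rw [hrest] at hjoin'
        rw [PySem.Chars.join_cons_cons] at hjoin' ⊢
        rw [← hjoin']
        simp

-- ---------- replace ----------

theorem replace_go_spec (o n : Char) :
    ∀ fuel (l acc : List Char), l.length ≤ fuel →
      PySem.Chars.replace.go [o] [n] fuel l acc =
        acc.reverse ++ l.map (fun c => if c = o then n else c) := by
  intro fuel
  induction fuel with
  | zero =>
    intro l acc h
    have hl : l = [] := List.length_eq_zero_iff.mp (Nat.le_zero.mp h)
    subst hl
    simp [PySem.Chars.replace.go]
  | succ fuel ih =>
    intro l acc h
    cases l with
    | nil => simp [PySem.Chars.replace.go]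
    | cons c t =>
      have ht : t.length ≤ fuel := by simpa using h
      by_cases hc : c = o
      · subst hc
        simp only [PySem.Chars.replace.go]
        rw [if_pos (prefix_single_head c t)]
        simp only [List.length_cons, List.length_nil, List.drop_succ_cons, List.drop_zero]
        rw [ih t _ ht]
        simp
      · simp only [PySem.Chars.replace.go]
        rw [prefix_single_ne t hc]
        simp only [Bool.false_eq_true, if_false]
        rw [ih t _ ht]
        simp [hc]

theorem replace_single (s : List Char) (o n : Char) :
    PySem.Chars.replace s [o] [n] = s.map (fun c => if c = o then n else c) := by
  unfold PySem.Chars.replace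
  simp only [List.isEmpty_cons, Bool.false_eq_true, if_false]
  rw [replace_go_spec o n s.length s [] (le_refl _)]
  simp

-- fold of single-character replace maps = one pass
theorem foldl_map_bad (bs : List Char) (hb : '_' ∉ bs) (l : List Char) :
    bs.foldl (fun acc b => acc.map (fun c => if c = b then '_' else c)) l =
      l.map (fun c => if c ∈ bs then '_' else c) := by
  induction bs generalizing l with
  | nil => simp
  | cons b bs ih =>
    simp only [List.mem_cons, not_or] at hb
    simp only [List.foldl_cons]
    rw [ih hb.2, List.map_map]
    congr 1
    funext c
    by_cases hc : c = b
    · subst hc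
      simp only [Function.comp_apply, List.mem_cons, true_or, if_true]
      rw [if_neg hb.2]
    · simp only [Function.comp_apply, if_neg hc, List.mem_cons]
      by_cases hm : c ∈ bs <;> simp [hm, hc]

-- A's String-level foldl of replaces, moved to the char level
theorem foldA (name : String) :
    ([" ", ".", "(", ")", "[", "]", "*", "+", ","].foldl
        (fun n bad_char => PySem.Str.replace n bad_char "_") name).toList =
      name.toList.map (fun c => if c ∈ pvBadL then '_' else c) := by
  have hgen : ∀ (bs : List String) (x : String),
      ((bs.foldl (fun n b => PySem.Str.replace n b "_") x)).toList =
        (bs.map String.toList).foldl (fun acc b => PySem.Chars.replace acc b ['_']) x.toList := by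
    intro bs
    induction bs with
    | nil => intro x; simp
    | cons b bs ih =>
      intro x
      simp only [List.foldl_cons, List.map_cons, ih]
      congr 1
      have : ("_" : String).toList = ['_'] := rfl
      rw [← this]
      exact PySem.Str.toList_replace x b "_"
  rw [hgen]
  have hlit : ([" ", ".", "(", ")", "[", "]", "*", "+", ","] : List String).map String.toList =
      pvBadL.map (fun c => [c]) := rfl
  rw [hlit]
  have hones : ∀ (cs : List Char) (l : List Char),
      (cs.map (fun c => [c])).foldl (fun acc b => PySem.Chars.replace acc b ['_']) l =
        cs.foldl (fun acc b => acc.map (fun c => if c = b then '_' else c)) l := by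
    intro cs
    induction cs with
    | nil => intro l; rfl
    | cons c cs ih =>
      intro l
      simp only [List.map_cons, List.foldl_cons, replace_single, ih]
  rw [hones]
  exact foldl_map_bad pvBadL (by decide) name.toList

theorem dropLast_one {α : Type} (x : α) : [x].dropLast = [] := rfl

theorem getLast?_one {α : Type} (x : α) : [x].getLast? = some x := rfl

-- pyGet? at -1 is getLast?
theorem pyGet?_neg_one {α : Type} (l : List α) (h : l ≠ []) :
    PySem.List.pyGet? l (-1) = l.getLast? := by
  simp only [PySem.List.pyGet?, PySem.List.pyIdx?]
  have h0 : ¬ (0 : Int) ≤ -1 := by omega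
  have h1 : -(l.length : Int) ≤ -1 := by
    have : (0 : Int) < l.length := by exact_mod_cast List.length_pos_iff.mpr h
    omega
  rw [if_neg h0, if_pos h1]
  simp [List.getLast?_eq_getElem?]

-- last occurrence decomposition
theorem exists_last_split {o : Char} {s : List Char} (h : o ∈ s) :
    ∃ u v, s = u ++ o :: v ∧ o ∉ v := by
  induction s with
  | nil => simp at h
  | cons a t ih =>
    by_cases ht : o ∈ t
    · obtain ⟨u, v, rfl, hv⟩ := ih ht
      exact ⟨a :: u, v, rfl, hv⟩
    · have ha : a = o := by
        rcases List.mem_cons.mp h with h' | h'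
        · exact h'.symm
        · exact absurd h' ht
      exact ⟨[], t, by rw [ha]; rfl, ht⟩

-- B's bad-set test is the list test
theorem bad_mem_iff (c : Char) : (c ∈ pvBad) ↔ c ∈ pvBadL := by
  unfold pvBad pvBadL
  exact PySem.Set.mem_ofList _ c

theorem alt_fun_eq : (fun c => if c ∈ pvBad then '_' else c) = (fun c => if c ∈ pvBadL then '_' else c) := by
  funext c
  by_cases h : c ∈ pvBadL
  · rw [if_pos ((bad_mem_iff c).mpr h), if_pos h]
  · rw [if_neg (fun hc => h ((bad_mem_iff c).mp hc)), if_neg h]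

-- A's parts, at the char level
theorem split_parts (fn : String) :
    ((PySem.Str.split? fn ".").getD []).map String.toList = pvSplit '.' fn.toList := by
  have h := PySem.Str.split?_map fn "."
  have hsep : ("." : String).toList = ['.'] := rfl
  rw [hsep] at h
  unfold PySem.Chars.split? at h
  simp only [List.isEmpty_cons, Bool.false_eq_true, if_false] at h
  cases hx : PySem.Str.split? fn "." with
  | none => rw [hx] at h; simp at h
  | some xs =>
    rw [hx] at h
    simp only [Option.map_some, Option.some.injEq] at h
    simpa [splitOn_eq_pvSplit] using h

-- ===== VERDICT (by name: the statement is the Claim_ definition above) =====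
theorem normalize_file_names_before_processing_spec : Claim_equal_normalize_file_names_before_processing := by
  intro fn _
  unfold Spec_normalize_file_names_before_processing
  apply String.toList_injective
  by_cases hmem : '.' ∈ fn.toList
  · -- '.' occurs: split at the last occurrence
    obtain ⟨u, v, hs, hv⟩ := exists_last_split hmem
    obtain ⟨hlen, hlast, hjoin⟩ := pvSplit_decomp '.' u v hv
    have hsp : ((PySem.Str.split? fn ".").getD []).map String.toList = pvSplit '.' (u ++ '.' :: v) := by
      rw [split_parts, hs]
    have hPne : (PySem.Str.split? fn ".").getD [] ≠ [] := by
      intro h0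
      rw [h0] at hsp
      have := pvSplit_ne_nil '.' (u ++ '.' :: v)
      simp at hsp
      exact this hsp
    have hgl : ((PySem.Str.split? fn ".").getD []).getLast?.map String.toList = some v := by
      rw [← List.getLast?_map, hsp, hlast]
    obtain ⟨ex, hex, hext⟩ : ∃ ex, ((PySem.Str.split? fn ".").getD []).getLast? = some ex ∧ ex.toList = v := by
      cases hg : ((PySem.Str.split? fn ".").getD []).getLast? with
      | none => rw [hg] at hgl; simp at hgl
      | some y => rw [hg] at hgl; simp at hgl; exact ⟨y, rfl, hgl⟩
    have hdl : (((PySem.Str.split? fn ".").getD []).dropLast).map String.toList =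
        (pvSplit '.' (u ++ '.' :: v)).dropLast := by
      rw [← hsp, List.map_dropLast]
    have hjoinu : (PySem.Str.join "." (((PySem.Str.split? fn ".").getD []).dropLast)).toList = u := by
      rw [PySem.Str.toList_join, hdl]
      exact hjoin
    have hA : (normalize_file_names_before_processing fn).toList =
        (u.map fun c => if c ∈ pvBadL then '_' else c) ++ '.' :: v := by
      simp only [normalize_file_names_before_processing, PySem.List.slice_to_neg_one,
        pyGet?_neg_one _ hPne, hex, Option.getD_some]
      simp only [String.toList_append, foldA, hjoinu, hext]
      simp [show ("." : String).toList = ['.'] from rfl]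
    have hB : (normalize_file_names_before_processing_alt fn).toList =
        (u.map fun c => if c ∈ pvBadL then '_' else c) ++ '.' :: v := by
      simp only [normalize_file_names_before_processing_alt, hs, rfind_decomp u v '.' hv]
      have hne : ¬ ((u.length : Int) = -1) := by omega
      have hdrop : List.drop (u.length + 1) (u ++ '.' :: v) = v := by
        rw [← List.drop_drop, List.drop_left, List.drop_succ_cons, List.drop_zero]
      simp only [if_neg hne, Int.toNat_natCast, List.take_left, hdrop, String.toList_ofList,
        alt_fun_eq]
      simp
    rw [hA, hB]
  · -- no '.' in the input
    have hsp : ((PySem.Str.split? fn ".").getD []).map String.toList = [fn.toList] := by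
      rw [split_parts, pvSplit_not_mem hmem]
    obtain ⟨x, hx, hxt⟩ : ∃ x, (PySem.Str.split? fn ".").getD [] = [x] ∧ x.toList = fn.toList := by
      cases hp : (PySem.Str.split? fn ".").getD [] with
      | nil => rw [hp] at hsp; simp at hsp
      | cons y t =>
        rw [hp] at hsp
        cases t with
        | nil => simp at hsp; exact ⟨y, rfl, hsp⟩
        | cons z t2 => simp at hsp
    have hA : (normalize_file_names_before_processing fn).toList = '.' :: fn.toList := by
      simp only [normalize_file_names_before_processing, hx, PySem.List.slice_to_neg_one,
        dropLast_one, pyGet?_neg_one [x] (by simp), getLast?_one,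
        Option.getD_some]
      simp only [String.toList_append, foldA, PySem.Str.toList_join, List.map_nil,
        PySem.Chars.join_nil, hxt]
      simp [show ("." : String).toList = ['.'] from rfl]
    have hB : (normalize_file_names_before_processing_alt fn).toList = '.' :: fn.toList := by
      simp only [normalize_file_names_before_processing_alt, rfind_not_mem _ _ hmem]
      simp
    rw [hA, hB]
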